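-- pv_equiv track=rewrite | github.com/mwj0528/CodingTest_Python | 프로그래머스/2/76502. 괄호 회전하기/괄호 회전하기.py | solution
-- ===== SOURCE A (Python) =====
-- def true_s(s):
--     stack = []
--     for i in range(len(s)):
--         if s[i] == '(':
--             stack.append(s[i])
--         elif s[i] == '{':
--             stack.append(s[i])
--         elif s[i] == '[':
--             stack.append(s[i])
--         elif s[i] == ')':
--             if len(stack) != 0 and stack[-1] == '(':
--                 stack.pop()
--             else:
--                 stack.append(s[i])
--         elif s[i] == '}':
--             if len(stack) != 0 and stack[-1] == '{':
--                 stack.pop()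
--             else:
--                 stack.append(s[i])
--         elif s[i] == ']':
--             if len(stack) != 0 and stack[-1] == '[':
--                 stack.pop()
--             else:
--                 stack.append(s[i])
--     if len(stack) == 0:
--         return True
--     else:
--         return False
--
-- def solution(s):
--     answer = 0
--     for i in range(len(s)):
--         s = s[-1] + s
--         s = s[:-1]
--         if true_s(s) == True:
--             answer += 1
--
--
--     return answer
-- ===== SOURCE B (Python) =====
-- def solution(s):
--     count = 0
--     n = len(s)
--     for i in range(n):
--         t = ''.join(c for c in s[i:] + s[:i] if c in '()[]{}')
--         while '()' in t or '{}' in t or '[]' in t: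
--             t = t.replace('()', '').replace('{}', '').replace('[]', '')
--         if t == '':
--             count += 1
--     return count
-- ===== Notes on version B (the rewrite author's own statement) =====
-- stated objective: alternative
-- what changed: The char-by-char right-rotation plus single-pass stack matcher is replaced by slice rotations checked by repeatedly deleting adjacent matched bracket pairs via str.replace until none remains (on the bracket characters, the only ones the stack matcher reads), a rotation counting as valid iff the reduction empties the string.
import Mathlib
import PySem

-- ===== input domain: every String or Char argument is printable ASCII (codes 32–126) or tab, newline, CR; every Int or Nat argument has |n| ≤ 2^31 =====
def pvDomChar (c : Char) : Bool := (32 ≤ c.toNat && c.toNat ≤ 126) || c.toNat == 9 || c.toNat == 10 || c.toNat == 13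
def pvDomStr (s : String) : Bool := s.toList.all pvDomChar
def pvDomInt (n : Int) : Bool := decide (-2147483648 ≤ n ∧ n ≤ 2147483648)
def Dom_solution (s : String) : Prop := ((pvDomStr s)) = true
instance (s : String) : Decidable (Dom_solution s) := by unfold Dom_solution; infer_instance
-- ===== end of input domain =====

-- B replaces the char-by-char rotate + stack matcher by slice rotations and a repeated
-- '()'/'{}'/'[]'-removal reduction (objective: alternative algorithm, same asymptotic cost).

-- ===== PORT A =====
-- true_s: stack matcher; Python's list-append/pop at the END is kept (stack.pop() drops the last element).
def trueS (cs : List Char) : Bool :=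
  let stack := (PySem.List.pyRange 0 (cs.length : Int) 1).foldl (fun (stack : List Char) i =>
    let ch := PySem.List.pyGetD cs i ' '   -- s[i], always in range here
    if ch = '(' then stack ++ [ch]
    else if ch = '{' then stack ++ [ch]
    else if ch = '[' then stack ++ [ch]
    else if ch = ')' then
      (if stack.length ≠ 0 ∧ PySem.List.pyGetD stack (-1) ' ' = '(' then stack.dropLast else stack ++ [ch])
    else if ch = '}' then
      (if stack.length ≠ 0 ∧ PySem.List.pyGetD stack (-1) ' ' = '{' then stack.dropLast else stack ++ [ch])
    else if ch = ']' then
      (if stack.length ≠ 0 ∧ PySem.List.pyGetD stack (-1) ' ' = '[' then stack.dropLast else stack ++ [ch])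
    else stack) []
  if stack.length = 0 then true else false

def solution (s : String) : Int :=
  let cs := s.toList
  let r := (PySem.List.pyRange 0 (cs.length : Int) 1).foldl (fun (st : Int × List Char) _i =>
    let s1 := [PySem.List.pyGetD st.2 (-1) ' '] ++ st.2     -- s = s[-1] + s  (s nonempty inside the loop)
    let s2 := PySem.List.slice s1 none (some (-1))          -- s = s[:-1]
    if trueS s2 = true then (st.1 + 1, s2) else (st.1, s2)) ((0 : Int), cs)
  r.1

-- ===== PORT B =====
-- helpers needed by reduceLoop's termination proof: t.replace(pair, '') removes the
-- non-overlapping occurrences left to right; removePair is that recursion spelled out.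
def removePair (o c : Char) : List Char → List Char
  | [] => []
  | [a] => [a]
  | a :: b :: t => if a = o ∧ b = c then removePair o c t else a :: removePair o c (b :: t)

theorem go_eq (o c : Char) : ∀ (fuel : Nat) (l acc : List Char), l.length ≤ fuel →
    PySem.Chars.replace.go [o, c] [] fuel l acc = acc.reverse ++ removePair o c l := by
  intro fuel
  induction fuel with
  | zero => intro l acc h
            cases l with
            | nil => simp [PySem.Chars.replace.go, removePair]
            | cons a t => simp at h
  | succ n ih =>
    intro l acc h
    match l with
    | [] => simp [PySem.Chars.replace.go, removePair]
    | [a] =>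
      simp only [PySem.Chars.replace.go]
      have hnp : ¬ ([o,c].isPrefixOf [a] = true) := by simp [List.isPrefixOf]
      simp only [hnp, Bool.false_eq_true, if_false]
      rw [ih [] (a :: acc) (by simp)]
      simp [removePair]
    | a :: b :: t =>
      simp only [PySem.Chars.replace.go]
      by_cases hp : a = o ∧ b = c
      · obtain ⟨rfl, rfl⟩ := hp
        have hyes : ([a,b].isPrefixOf (a :: b :: t)) = true := by simp [List.isPrefixOf]
        simp only [hyes, if_true]
        simp only [List.length_cons] at h
        rw [show ([a,b] : List Char).length = 2 from rfl]
        rw [show List.drop 2 (a :: b :: t) = t from rfl, ih t ([].reverse ++ acc) (by omega)]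
        simp [removePair]
      · have hno : ([o,c].isPrefixOf (a :: b :: t)) = false := by
          simp [List.isPrefixOf]
          intro h1 h2; exact hp ⟨h1.symm, h2.symm⟩
        simp only [hno, Bool.false_eq_true, if_false]
        rw [ih (b :: t) (a :: acc) (by simp at h ⊢; omega)]
        simp [removePair, hp]

theorem replace_pair_empty (o c : Char) (l : List Char) :
    PySem.Chars.replace l [o, c] [] = removePair o c l := by
  have : ([o,c] : List Char).isEmpty = false := rfl
  simp only [PySem.Chars.replace, this]
  rw [go_eq o c l.length l [] (le_refl _)]
  simp

theorem removePair_length_le (o c : Char) (l : List Char) :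
    (removePair o c l).length ≤ l.length := by
  fun_induction removePair o c l with
  | case1 => simp
  | case2 => simp
  | case3 a b t hp ih => simp; omega
  | case4 a b t hp ih => simp at ih ⊢; omega

theorem infix_pair_cons (o c a : Char) (t : List Char) :
    [o, c] <:+: (a :: t) ↔ (a = o ∧ t.head? = some c) ∨ [o, c] <:+: t := by
  constructor
  · intro h
    rcases List.infix_cons_iff.mp h with hpre | h
    · rcases hpre with ⟨r, hr⟩
      rw [List.cons_append, List.singleton_append] at hr
      injection hr with h1 h2
      left; exact ⟨h1.symm, by rw [← h2]; rfl⟩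
    · right; exact h
  · rintro (⟨rfl, hh⟩ | h)
    · cases t with
      | nil => simp at hh
      | cons b t' => simp at hh; subst hh
                     exact ⟨[], t', rfl⟩
    · exact h.trans (List.suffix_cons a t).isInfix

theorem removePair_eq_self_of_not_infix (o c : Char) (l : List Char) (h : ¬ [o, c] <:+: l) :
    removePair o c l = l := by
  fun_induction removePair o c l with
  | case1 => rfl
  | case2 => rfl
  | case3 a b t hp ih =>
    exact absurd ((infix_pair_cons o c a (b :: t)).mpr (Or.inl ⟨hp.1, by simp [hp.2]⟩)) h
  | case4 a b t hp ih =>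
    rw [ih (fun hi => h ((infix_pair_cons o c a (b :: t)).mpr (Or.inr hi)))]

theorem removePair_length_lt_of_infix (o c : Char) (l : List Char) (h : [o, c] <:+: l) :
    (removePair o c l).length < l.length := by
  fun_induction removePair o c l with
  | case1 => simp at h
  | case2 a => exfalso
               rcases (infix_pair_cons o c a []).mp h with ⟨_, hh⟩ | hh <;> simp at hh
  | case3 a b t hp ih =>
    have := removePair_length_le o c t
    simp; omega
  | case4 a b t hp ih =>
    have hi : [o, c] <:+: (b :: t) := by
      rcases (infix_pair_cons o c a (b :: t)).mp h with ⟨h1, h2⟩ | hh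
      · simp at h2; exact absurd ⟨h1, h2⟩ hp
      · exact hh
    have := ih hi
    simp at this ⊢; omega

theorem rep3_len_lt (t : List Char)
    (h : (PySem.Chars.isIn ['(', ')'] t || PySem.Chars.isIn ['{', '}'] t || PySem.Chars.isIn ['[', ']'] t) = true) :
    (PySem.Chars.replace (PySem.Chars.replace (PySem.Chars.replace t ['(', ')'] []) ['{', '}'] []) ['[', ']'] []).length < t.length := by
  rw [replace_pair_empty]
  rw [replace_pair_empty]
  rw [replace_pair_empty]
  by_cases h1 : ['(', ')'] <:+: t
  · have l1 := removePair_length_lt_of_infix '(' ')' t h1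
    have l2 := removePair_length_le '{' '}' (removePair '(' ')' t)
    have l3 := removePair_length_le '[' ']' (removePair '{' '}' (removePair '(' ')' t))
    omega
  · rw [removePair_eq_self_of_not_infix '(' ')' t h1]
    by_cases h2 : ['{', '}'] <:+: t
    · have l2 := removePair_length_lt_of_infix '{' '}' t h2
      have l3 := removePair_length_le '[' ']' (removePair '{' '}' t)
      omega
    · rw [removePair_eq_self_of_not_infix '{' '}' t h2]
      have h3 : ['[', ']'] <:+: t := by
        rcases Bool.or_eq_true_iff.mp h with hh | hh
        · rcases Bool.or_eq_true_iff.mp hh with hh' | hh'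
          · exact absurd ((PySem.Chars.isIn_iff_infix _ _).mp hh') h1
          · exact absurd ((PySem.Chars.isIn_iff_infix _ _).mp hh') h2
        · exact (PySem.Chars.isIn_iff_infix _ _).mp hh
      exact removePair_length_lt_of_infix '[' ']' t h3

-- the while loop: while '()' in t or '{}' in t or '[]' in t: t = t.replace(…).replace(…).replace(…)
def reduceLoop (t : List Char) : List Char :=
  if h : (PySem.Chars.isIn ['(', ')'] t || PySem.Chars.isIn ['{', '}'] t || PySem.Chars.isIn ['[', ']'] t) = true then
    reduceLoop (PySem.Chars.replace (PySem.Chars.replace (PySem.Chars.replace t ['(', ')'] []) ['{', '}'] []) ['[', ']'] [])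
  else t
termination_by t.length
decreasing_by exact rep3_len_lt t h

def bracketChars : List Char := ['(', ')', '[', ']', '{', '}']   -- the string '()[]{}'

def solution_alt (s : String) : Int :=
  let cs := s.toList
  (PySem.List.pyRange 0 (cs.length : Int) 1).foldl (fun (count : Int) i =>
    let t := (PySem.List.slice cs (some i) none ++ PySem.List.slice cs none (some i)).filter
               (fun c => PySem.Chars.isIn [c] bracketChars)    -- s[i:]+s[:i], keeping bracket chars
    if reduceLoop t = [] then count + 1 else count) 0

-- ===== PRECONDITION & SPEC =====
def Spec_solution (s : String) (out : Int) : Prop := out = solution_alt s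
instance (s : String) (out : Int) : Decidable (Spec_solution s out) := by unfold Spec_solution; infer_instance

-- ===== CLAIM (what is proved, stated in full; the proofs are below) =====
def Claim_equal_solution : Prop := ∀ (s : String), Dom_solution s → Spec_solution s (solution s)

-- ===== LEMMAS AND PROOFS =====


-- proof machinery: the stack step, A's loop body named
def stepA (stack : List Char) (ch : Char) : List Char :=
  if ch = '(' then stack ++ [ch]
  else if ch = '{' then stack ++ [ch]
  else if ch = '[' then stack ++ [ch]
  else if ch = ')' then
    (if stack.length ≠ 0 ∧ PySem.List.pyGetD stack (-1) ' ' = '(' then stack.dropLast else stack ++ [ch])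
  else if ch = '}' then
    (if stack.length ≠ 0 ∧ PySem.List.pyGetD stack (-1) ' ' = '{' then stack.dropLast else stack ++ [ch])
  else if ch = ']' then
    (if stack.length ≠ 0 ∧ PySem.List.pyGetD stack (-1) ' ' = '[' then stack.dropLast else stack ++ [ch])
  else stack

def bracket (c : Char) : Bool :=
  c = '(' || c = ')' || c = '[' || c = ']' || c = '{' || c = '}'

def noMatch (l : List Char) : Prop :=
  ¬ ['(', ')'] <:+: l ∧ ¬ ['{', '}'] <:+: l ∧ ¬ ['[', ']'] <:+: l

theorem trueS_eq_foldl (cs : List Char) :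
    trueS cs = (if (cs.foldl stepA []).length = 0 then true else false) := by
  unfold trueS
  show (if ((PySem.List.pyRange 0 (cs.length : Int) 1).foldl
      (fun stack i => stepA stack (PySem.List.pyGetD cs i ' ')) []).length = 0 then true else false) = _
  rw [PySem.List.foldl_pyRange_zero_pyGetD' cs ' ' stepA []]


theorem pyGetD_append_singleton (l : List Char) (x d : Char) :
    PySem.List.pyGetD (l ++ [x]) (-1) d = x := by
  simp [PySem.List.pyGetD, PySem.List.pyGet?, PySem.List.pyIdx?]


theorem stepA_open (st : List Char) (o : Char) (ho : o = '(' ∨ o = '{' ∨ o = '[') :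
    stepA st o = st ++ [o] := by
  rcases ho with rfl | rfl | rfl <;> simp [stepA]


theorem stepA_cancel (st : List Char) (o c : Char)
    (h : (o, c) = ('(', ')') ∨ (o, c) = ('{', '}') ∨ (o, c) = ('[', ']')) :
    stepA (st ++ [o]) c = st := by
  rcases h with h | h | h <;>
  · injection h with h1 h2; subst h1; subst h2
    simp [stepA]


theorem stepA_nonbracket (st : List Char) (ch : Char) (h : bracket ch = false) :
    stepA st ch = st := by
  have h1 : ¬ ch = '(' := by intro hh; subst hh; simp [bracket] at h
  have h2 : ¬ ch = ')' := by intro hh; subst hh; simp [bracket] at h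
  have h3 : ¬ ch = '[' := by intro hh; subst hh; simp [bracket] at h
  have h4 : ¬ ch = ']' := by intro hh; subst hh; simp [bracket] at h
  have h5 : ¬ ch = '{' := by intro hh; subst hh; simp [bracket] at h
  have h6 : ¬ ch = '}' := by intro hh; subst hh; simp [bracket] at h
  simp [stepA, h1, h2, h3, h4, h5, h6]


theorem foldl_stepA_filter (cs : List Char) : ∀ st,
    cs.foldl stepA st = (cs.filter bracket).foldl stepA st := by
  induction cs with
  | nil => intro st; rfl
  | cons a t ih =>
    intro st
    by_cases hb : bracket a = true
    · simp [hb, List.foldl_cons, ih]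
    · simp only [Bool.not_eq_true] at hb
      simp [hb, List.foldl_cons, stepA_nonbracket st a hb, ih]


theorem foldl_stepA_removePair (o c : Char)
    (h : (o, c) = ('(', ')') ∨ (o, c) = ('{', '}') ∨ (o, c) = ('[', ']'))
    (cs : List Char) : ∀ st, (removePair o c cs).foldl stepA st = cs.foldl stepA st := by
  have ho : o = '(' ∨ o = '{' ∨ o = '[' := by
    rcases h with h | h | h <;> injection h with h1 h2 <;> subst h1 <;> simp
  fun_induction removePair o c cs with
  | case1 => intro st; rfl
  | case2 a => intro st; rfl
  | case3 a b t hp ih =>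
    intro st
    obtain ⟨rfl, rfl⟩ := hp
    rw [ih st, List.foldl_cons, List.foldl_cons, stepA_open st a ho, stepA_cancel st a b h]
  | case4 a b t hp ih =>
    intro st
    rw [List.foldl_cons, List.foldl_cons, ih (stepA st a)]


theorem reduceLoop_foldl (t : List Char) : ∀ st,
    (reduceLoop t).foldl stepA st = t.foldl stepA st := by
  fun_induction reduceLoop t with
  | case1 t h ih =>
    intro st
    rw [ih st, replace_pair_empty, replace_pair_empty, replace_pair_empty]
    rw [foldl_stepA_removePair '[' ']' (by simp) _ st]
    rw [foldl_stepA_removePair '{' '}' (by simp) _ st]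
    rw [foldl_stepA_removePair '(' ')' (by simp) _ st]
  | case2 t h => intro st; rfl


theorem reduceLoop_noMatch (t : List Char) : noMatch (reduceLoop t) := by
  fun_induction reduceLoop t with
  | case1 t h ih => exact ih
  | case2 t h =>
    simp only [Bool.or_eq_true, not_or] at h
    obtain ⟨⟨h1, h2⟩, h3⟩ := h
    exact ⟨fun hi => by rw [(PySem.Chars.isIn_iff_infix _ _).mpr hi] at h1; exact h1 rfl,
           fun hi => by rw [(PySem.Chars.isIn_iff_infix _ _).mpr hi] at h2; exact h2 rfl,
           fun hi => by rw [(PySem.Chars.isIn_iff_infix _ _).mpr hi] at h3; exact h3 rfl⟩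


theorem removePair_sublist (o c : Char) (l : List Char) : (removePair o c l).Sublist l := by
  fun_induction removePair o c l with
  | case1 => exact List.Sublist.refl _
  | case2 a => exact List.Sublist.refl _
  | case3 a b t hp ih => exact ih.trans ((List.sublist_cons_self b t).trans (List.sublist_cons_self a _))
  | case4 a b t hp ih => exact ih.cons₂ a


theorem reduceLoop_sublist (t : List Char) : (reduceLoop t).Sublist t := by
  fun_induction reduceLoop t with
  | case1 t h ih =>
    refine ih.trans ?_
    rw [replace_pair_empty, replace_pair_empty, replace_pair_empty]
    exact ((removePair_sublist _ _ _).trans (removePair_sublist _ _ _)).trans (removePair_sublist _ _ _)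
  | case2 t h => exact List.Sublist.refl _


theorem closer_no_cancel (u : List Char) (o c : Char) (rest : List Char)
    (hnm : ¬ [o, c] <:+: (u ++ c :: rest)) :
    ¬ (u.length ≠ 0 ∧ PySem.List.pyGetD u (-1) ' ' = o) := by
  rintro ⟨hne, hlast⟩
  have hu : u ≠ [] := by intro hh; subst hh; simp at hne
  have hsplit : u = u.dropLast ++ [u.getLast hu] := (List.dropLast_append_getLast hu).symm
  rw [hsplit, pyGetD_append_singleton] at hlast
  apply hnm
  refine ⟨u.dropLast, rest, ?_⟩
  rw [hsplit]
  simp [hlast]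

theorem foldl_stepA_irreducible (t : List Char) : ∀ u,
    (∀ x ∈ t, bracket x = true) → noMatch (u ++ t) → t.foldl stepA u = u ++ t := by
  induction t with
  | nil => intro u _ _; simp
  | cons a rest ih =>
    intro u hb hnm
    have hnm' : noMatch (u ++ [a] ++ rest) := by simpa using hnm
    have hstep : stepA u a = u ++ [a] := by
      have ha := hb a (by simp)
      simp only [bracket, Bool.or_eq_true, decide_eq_true_eq] at ha
      rcases ha with ((((rfl | rfl) | rfl) | rfl) | rfl) | rfl
      · exact stepA_open u _ (by simp)
      · have := closer_no_cancel u '(' ')' rest (by simpa using hnm.1)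
        simp [stepA]
        intro h1 h2
        exact absurd ⟨by simpa using h1, h2⟩ this
      · exact stepA_open u _ (by simp)
      · have := closer_no_cancel u '[' ']' rest (by simpa using hnm.2.2)
        simp [stepA]
        intro h1 h2
        exact absurd ⟨by simpa using h1, h2⟩ this
      · exact stepA_open u _ (by simp)
      · have := closer_no_cancel u '{' '}' rest (by simpa using hnm.2.1)
        simp [stepA]
        intro h1 h2
        exact absurd ⟨by simpa using h1, h2⟩ this
    rw [List.foldl_cons, hstep]
    rw [ih (u ++ [a]) (fun x hx => hb x (by simp [hx])) hnm']
    simp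


theorem isIn_singleton_bracketChars (c : Char) :
    PySem.Chars.isIn [c] bracketChars = bracket c := by
  have hiff : (PySem.Chars.isIn [c] bracketChars = true) ↔ (bracket c = true) := by
    rw [PySem.Chars.isIn_iff_infix, List.singleton_infix_iff]
    simp [bracketChars, bracket]
    tauto
  cases hc : bracket c
  · cases hi : PySem.Chars.isIn [c] bracketChars
    · rfl
    · rw [hiff.mp hi] at hc; exact absurd hc (by simp)
  · exact hiff.mpr hc


theorem checkEquiv (r : List Char) :
    trueS r = decide (reduceLoop (r.filter bracket) = []) := by
  rw [trueS_eq_foldl]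
  have h1 : r.foldl stepA [] = (r.filter bracket).foldl stepA [] := foldl_stepA_filter r []
  have h2 : (reduceLoop (r.filter bracket)).foldl stepA [] = (r.filter bracket).foldl stepA [] :=
    reduceLoop_foldl (r.filter bracket) []
  by_cases hred : reduceLoop (r.filter bracket) = []
  · rw [hred] at h2
    simp only [List.foldl_nil] at h2
    rw [h1, ← h2]
    simp [hred]
  · have hbr : ∀ x ∈ reduceLoop (r.filter bracket), bracket x = true := by
      intro x hx
      exact List.of_mem_filter ((reduceLoop_sublist (r.filter bracket)).subset hx)
    have hirr := foldl_stepA_irreducible (reduceLoop (r.filter bracket)) [] hbr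
      (by simpa using reduceLoop_noMatch (r.filter bracket))
    rw [h1, ← h2, hirr]
    have hne : ¬ ([] ++ reduceLoop (r.filter bracket)).length = 0 := by simpa using hred
    simp [hred]


-- rotations
def g (cs : List Char) (j : Nat) : List Char := cs.drop j ++ cs.take j

theorem rotStep_g (cs : List Char) (j : Nat) (h1 : 1 ≤ j) (h2 : j ≤ cs.length) :
    PySem.List.slice ([PySem.List.pyGetD (g cs j) (-1) ' '] ++ g cs j) none (some (-1)) = g cs (j - 1) := by
  have hjl : j - 1 < cs.length := by omega
  have htake : cs.take j = cs.take (j - 1) ++ [cs[j - 1]] := by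
    have h := List.take_succ_eq_append_getElem (l := cs) hjl
    rw [show j - 1 + 1 = j by omega] at h
    exact h
  have hdrop : cs.drop (j - 1) = cs[j - 1] :: cs.drop j := by
    have h := List.drop_eq_getElem_cons hjl
    rw [show j - 1 + 1 = j by omega] at h
    exact h
  unfold g
  rw [htake]
  rw [show cs.drop j ++ (cs.take (j - 1) ++ [cs[j - 1]]) =
      (cs.drop j ++ cs.take (j - 1)) ++ [cs[j - 1]] from by simp]
  rw [pyGetD_append_singleton]
  rw [PySem.List.slice_to_neg_one]
  rw [show ([cs[j-1]] ++ ((cs.drop j ++ cs.take (j - 1)) ++ [cs[j-1]])) =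
      (([cs[j-1]] ++ (cs.drop j ++ cs.take (j - 1))) ++ [cs[j-1]]) from by simp]
  rw [List.dropLast_concat, hdrop]
  simp


def rotBody (st : Int × List Char) (_i : Int) : Int × List Char :=
  let s1 := [PySem.List.pyGetD st.2 (-1) ' '] ++ st.2
  let s2 := PySem.List.slice s1 none (some (-1))
  if trueS s2 = true then (st.1 + 1, s2) else (st.1, s2)

theorem rotFold_inv (cs : List Char) (i : Nat) (hi : i ≤ cs.length) :
    (PySem.List.pyRange 0 (i : Int) 1).foldl rotBody ((0 : Int), cs) =
      (((List.range i).countP (fun k => trueS (g cs (cs.length - 1 - k))) : Int),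
        g cs (cs.length - i)) := by
  induction i with
  | zero => simp [PySem.List.pyRange_one_eq_nil, g]
  | succ i ih =>
    have hii : i ≤ cs.length := by omega
    rw [show ((i + 1 : Nat) : Int) = (i : Int) + 1 by push_cast; ring]
    rw [PySem.List.pyRange_one_succ_right (by positivity), List.foldl_append, ih hii]
    rw [List.foldl_cons, List.foldl_nil]
    have hrot : PySem.List.slice
        ([PySem.List.pyGetD (g cs (cs.length - i)) (-1) ' '] ++ g cs (cs.length - i)) none (some (-1))
        = g cs (cs.length - i - 1) := rotStep_g cs (cs.length - i) (by omega) (by omega)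
    have hidx1 : cs.length - i - 1 = cs.length - (i + 1) := by omega
    have hidx2 : cs.length - i - 1 = cs.length - 1 - i := by omega
    rw [List.range_succ, List.countP_append, List.countP_cons, List.countP_nil]
    unfold rotBody
    simp only [hrot]
    rw [← hidx1, hidx2]
    by_cases ht : trueS (g cs (cs.length - 1 - i)) = true
    · rw [if_pos ht, if_pos ht]
      exact congrArg₂ Prod.mk (by push_cast; ring) rfl
    · rw [if_neg ht, if_neg ht]
      exact congrArg₂ Prod.mk (by push_cast; ring) rfl

theorem solution_eq_countP (s : String) :
    solution s = ((List.range s.toList.length).countP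
      (fun i => trueS (g s.toList (s.toList.length - 1 - i))) : Int) := by
  show ((PySem.List.pyRange 0 (s.toList.length : Int) 1).foldl rotBody ((0 : Int), s.toList)).1 = _
  rw [rotFold_inv s.toList s.toList.length (le_refl _)]


theorem solution_alt_eq_countP (s : String) :
    solution_alt s = ((List.range s.toList.length).countP
      (fun j => decide (reduceLoop ((g s.toList j).filter bracket) = [])) : Int) := by
  show (PySem.List.pyRange 0 (s.toList.length : Int) 1).foldl
      (fun (count : Int) i =>
        if reduceLoop ((PySem.List.slice s.toList (some i) none ++ PySem.List.slice s.toList none (some i)).filter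
            (fun c => PySem.Chars.isIn [c] bracketChars)) = [] then count + 1 else count) 0 = _
  rw [show (fun c => PySem.Chars.isIn [c] bracketChars) = bracket from funext isIn_singleton_bracketChars]
  rw [PySem.List.pyRange_one]
  rw [List.foldl_map]
  rw [show ((s.toList.length : Int) - 0).toNat = s.toList.length by omega]
  rw [show (fun (count : Int) (k : Nat) =>
        if reduceLoop ((PySem.List.slice s.toList (some (0 + (k : Int))) none ++
            PySem.List.slice s.toList none (some (0 + (k : Int)))).filter bracket) = []
        then count + 1 else count)
      = (fun (count : Int) (k : Nat) =>
        if (fun j => decide (reduceLoop ((g s.toList j).filter bracket) = [])) k = true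
        then count + 1 else count) from by
    funext c k
    rw [show ((0 : Int) + (k : Int)) = (k : Int) by ring]
    rw [PySem.List.slice_from_natCast, PySem.List.slice_to_natCast]
    simp [g]]
  rw [PySem.List.foldl_count_if]
  simp


theorem map_sub_range (n : Nat) :
    (List.range n).map (fun i => n - 1 - i) = (List.range n).reverse := by
  apply List.ext_getElem
  · simp
  · intro k h1 h2
    simp [List.getElem_reverse]


-- ===== VERDICT (by name: the statement is the Claim_ definition above) =====
theorem solution_spec : Claim_equal_solution := by
  intro s _
  unfold Spec_solution
  rw [solution_eq_countP, solution_alt_eq_countP]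
  congr 1
  have hpt : ∀ i, trueS (g s.toList i) = decide (reduceLoop ((g s.toList i).filter bracket) = []) :=
    fun i => checkEquiv (g s.toList i)
  calc (List.range s.toList.length).countP (fun i => trueS (g s.toList (s.toList.length - 1 - i)))
      = (List.range s.toList.length).countP
          ((fun j => trueS (g s.toList j)) ∘ (fun i => s.toList.length - 1 - i)) := rfl
    _ = ((List.range s.toList.length).map (fun i => s.toList.length - 1 - i)).countP
          (fun j => trueS (g s.toList j)) := (List.countP_map).symm
    _ = (List.range s.toList.length).reverse.countP (fun j => trueS (g s.toList j)) := by
          rw [map_sub_range]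
    _ = (List.range s.toList.length).countP (fun j => trueS (g s.toList j)) := List.countP_reverse
    _ = (List.range s.toList.length).countP
          (fun j => decide (reduceLoop ((g s.toList j).filter bracket) = [])) := by
          exact List.countP_congr (fun j _ => by rw [hpt j])
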